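-- pv_equiv track=rewrite | github.com/opensearch-project/opensearch-migrations | migrationConsole/lib/console_link/console_link/workflow/commands/autocomplete_k8s_labels.py | _get_selected_keys
-- ===== SOURCE A (Python) =====
-- def _get_selected_keys(prefix):
--     """Extracts keys already present in the prefix to avoid duplicates."""
--     keys = set()
--     if not prefix:
--         return keys
--     for part in prefix.rstrip(",").split(","):
--         if "=" in part:
--             keys.add(part.split("=", 1)[0])
--     return keys
-- ===== SOURCE B (Python) =====
-- def _get_selected_keys(prefix):
--     """Extracts keys already present in the prefix to avoid duplicates.
--
--     Single character-level pass: instead of rstrip+split+per-part split,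
--     scan once, accumulating the current segment's key up to its first '='
--     and resetting at each ','.
--     """
--     keys = set()
--     cur = []
--     seen_eq = False
--     for ch in prefix:
--         if ch == ',':
--             cur = []
--             seen_eq = False
--         elif ch == '=':
--             if not seen_eq:
--                 keys.add(''.join(cur))
--                 seen_eq = True
--         elif not seen_eq:
--             cur.append(ch)
--     return keys
-- ===== Notes on version B (the rewrite author's own statement) =====
-- stated objective: alternative
-- what changed: Replaced rstrip+split(',')+per-part split('=',1) with a single character-level scan that accumulates each segment's key up to its first '=' and resets at commas.
import Mathlib
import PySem

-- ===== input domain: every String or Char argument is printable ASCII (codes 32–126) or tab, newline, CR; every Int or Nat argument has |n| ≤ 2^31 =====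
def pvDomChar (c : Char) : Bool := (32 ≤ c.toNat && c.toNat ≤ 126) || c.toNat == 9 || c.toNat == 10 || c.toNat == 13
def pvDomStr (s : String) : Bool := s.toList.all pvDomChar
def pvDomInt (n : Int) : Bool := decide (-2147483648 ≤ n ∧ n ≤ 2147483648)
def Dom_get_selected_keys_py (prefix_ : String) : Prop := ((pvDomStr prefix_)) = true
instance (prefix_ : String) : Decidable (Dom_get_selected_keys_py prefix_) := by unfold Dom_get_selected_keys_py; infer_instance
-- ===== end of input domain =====

-- B replaces A's rstrip+split+per-part-split with one character-level scan; equivalence of the two set builds is proved below.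

-- ===== PORT A =====
-- A: keys = set(); if not prefix: return keys; for part in prefix.rstrip(",").split(","): if "=" in part: keys.add(part.split("=",1)[0])
def get_selected_keys_py (prefix_ : String) : List String :=
  let keys : PySem.Set String := PySem.Set.empty
  if prefix_.toList.isEmpty then keys
  else
    -- prefix.rstrip(",") ported by hand (PySem has no one-sided strip with a chars argument):
    -- drop trailing characters that are in ",", exactly CPython's str.rstrip(chars)
    let stripped : List Char := (prefix_.toList.reverse.dropWhile (fun c => [','].contains c)).reverse
    (PySem.Chars.splitOn stripped [',']).foldl
      (fun ks part =>
        if PySem.Chars.isIn ['='] part then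
          -- part.split("=", 1)[0]: split's result is always nonempty, so [0] is its head
          PySem.Set.add ks (String.mk ((PySem.Chars.splitOnMax part ['='] 1).headD []))
        else ks) keys

-- ===== PORT B =====
-- B's loop body: state (keys, cur, seen_eq), one step per character
def altStep (st : PySem.Set String × List Char × Bool) (ch : Char) :
    PySem.Set String × List Char × Bool :=
  if ch = ',' then (st.1, [], false)
  else if ch = '=' then
    if !st.2.2 then (PySem.Set.add st.1 (String.mk st.2.1), st.2.1, true) else st
  else if !st.2.2 then (st.1, st.2.1 ++ [ch], st.2.2) else st

def get_selected_keys_py_alt (prefix_ : String) : List String :=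
  (prefix_.toList.foldl altStep (PySem.Set.empty, [], false)).1

-- ===== PRECONDITION & SPEC =====
def Spec_get_selected_keys_py (prefix_ : String) (out : List String) : Prop := out = get_selected_keys_py_alt prefix_
instance (prefix_ : String) (out : List String) : Decidable (Spec_get_selected_keys_py prefix_ out) := by unfold Spec_get_selected_keys_py; infer_instance

-- ===== CLAIM (what is proved, stated in full; the proofs are below) =====
def Claim_equal_get_selected_keys_py : Prop := ∀ (prefix_ : String), Dom_get_selected_keys_py prefix_ → Spec_get_selected_keys_py prefix_ (get_selected_keys_py prefix_)

-- ===== LEMMAS AND PROOFS =====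

-- proof helper: prepend a list of chars to the head segment (result of accumulating into the first piece)
def consHd (x : List Char) : List (List Char) → List (List Char)
  | [] => [x]
  | h :: t => (x ++ h) :: t

-- proof helper: the comma-split of a char list, by structural recursion
def mySplit : List Char → List (List Char)
  | [] => [[]]
  | c :: t => if c = ',' then [] :: mySplit t else consHd [c] (mySplit t)

-- proof helper: the per-segment step both programs implement
def gSeg (ks : PySem.Set String) (part : List Char) : PySem.Set String :=
  if '=' ∈ part then PySem.Set.add ks (String.mk (part.takeWhile (· ≠ '='))) else ks

-- proof helper: what B's in-flight state (cur, seen) contributes on the current (head) segment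
def hAux (ks : PySem.Set String) (cur : List Char) (seen : Bool) (seg : List Char) :
    PySem.Set String :=
  if seen then ks
  else if '=' ∈ seg then PySem.Set.add ks (String.mk (cur ++ seg.takeWhile (· ≠ '='))) else ks

theorem mySplit_ne_nil (cs : List Char) : mySplit cs ≠ [] := by
  cases cs with
  | nil => simp [mySplit]
  | cons c t =>
    simp only [mySplit]
    split
    · simp
    · cases h : mySplit t <;> simp [consHd]

theorem splitOn_go_eq (fuel : Nat) (l cur : List Char) (acc : List (List Char))
    (h : l.length < fuel) :
    PySem.Chars.splitOn.go [','] fuel l cur acc = acc.reverse ++ consHd cur.reverse (mySplit l) := by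
  induction fuel generalizing l cur acc with
  | zero => omega
  | succ fuel ih =>
    cases l with
    | nil => simp [PySem.Chars.splitOn.go, mySplit, consHd]
    | cons c rest =>
      by_cases hc : c = ','
      · subst hc
        have hpre : List.isPrefixOf [','] (',' :: rest) = true := by
          simp [List.isPrefixOf]
        simp only [PySem.Chars.splitOn.go, hpre, if_pos]
        rw [show List.drop [','].length (',' :: rest) = rest from rfl]
        rw [ih rest [] (cur.reverse :: acc) (by simpa using Nat.lt_of_succ_lt_succ h)]
        have hne := mySplit_ne_nil rest
        cases hms : mySplit rest with
        | nil => exact absurd hms hne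
        | cons mh mt => simp [mySplit, consHd, hms]
      · have hpre : List.isPrefixOf [','] (c :: rest) = false := by
          simp [List.isPrefixOf]; intro h'; exact hc h'.symm
        simp only [PySem.Chars.splitOn.go, hpre]
        rw [if_neg (by simp [hpre])]
        rw [ih rest (c :: cur) acc (by simpa using Nat.lt_of_succ_lt_succ h)]
        have hne := mySplit_ne_nil rest
        cases hms : mySplit rest with
        | nil => exact absurd hms hne
        | cons mh mt => simp [mySplit, consHd, hms, hc]

theorem splitOn_comma_eq (s : List Char) : PySem.Chars.splitOn s [','] = mySplit s := by
  have := splitOn_go_eq (s.length + 1) s [] [] (by omega)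
  simpa [PySem.Chars.splitOn, consHd] using
    (by
      rw [PySem.Chars.splitOn]
      rw [splitOn_go_eq (s.length + 1) s [] [] (by omega)]
      have hne := mySplit_ne_nil s
      cases hms : mySplit s with
      | nil => exact absurd hms hne
      | cons mh mt => simp [consHd]
      : PySem.Chars.splitOn s [','] = mySplit s)

-- splitOnMax.go with maxsplit 0 returns the rest as one piece
theorem splitOnMax_go_zero (fuel : Nat) (l cur : List Char) (acc : List (List Char)) :
    PySem.Chars.splitOnMax.go ['='] fuel 0 l cur acc = acc.reverse ++ [cur.reverse ++ l] := by
  cases fuel with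
  | zero => simp [PySem.Chars.splitOnMax.go]
  | succ fuel =>
    cases l with
    | nil => simp [PySem.Chars.splitOnMax.go]
    | cons c rest => simp [PySem.Chars.splitOnMax.go]

theorem splitOnMax_go_one (fuel : Nat) (l cur : List Char) (acc : List (List Char))
    (h : l.length < fuel) :
    PySem.Chars.splitOnMax.go ['='] fuel 1 l cur acc =
      acc.reverse ++ (cur.reverse ++ l.takeWhile (· ≠ '=')) ::
        (if '=' ∈ l then [(l.dropWhile (· ≠ '=')).tail] else []) := by
  induction fuel generalizing l cur acc with
  | zero => omega
  | succ fuel ih =>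
    cases l with
    | nil => simp [PySem.Chars.splitOnMax.go]
    | cons c rest =>
      by_cases hc : c = '='
      · subst hc
        have hpre : List.isPrefixOf ['='] ('=' :: rest) = true := by simp [List.isPrefixOf]
        simp only [PySem.Chars.splitOnMax.go, hpre, if_pos]
        rw [if_neg (by omega)]
        rw [show (1 - 1 : Nat) = 0 from rfl]
        rw [splitOnMax_go_zero]
        simp [List.takeWhile, List.dropWhile]
      · have hpre : List.isPrefixOf ['='] (c :: rest) = false := by
          simp [List.isPrefixOf]; intro h'; exact hc h'.symm
        simp only [PySem.Chars.splitOnMax.go]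
        rw [if_neg (by omega), if_neg (by simp [hpre])]
        rw [ih rest (c :: cur) acc (by simpa using Nat.lt_of_succ_lt_succ h)]
        have hc' : ¬ ('=' = c) := fun h => hc h.symm
        simp [List.takeWhile, List.dropWhile, hc, hc']

-- A's per-part body equals gSeg
theorem partBody_eq (ks : PySem.Set String) (part : List Char) :
    (if PySem.Chars.isIn ['='] part then
        PySem.Set.add ks (String.mk ((PySem.Chars.splitOnMax part ['='] 1).headD []))
      else ks) = gSeg ks part := by
  have hin : PySem.Chars.isIn ['='] part = true ↔ '=' ∈ part := by
    rw [PySem.Chars.isIn_iff_infix]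
    constructor
    · rintro ⟨p, s, rfl⟩; simp
    · intro hm
      obtain ⟨p, s, rfl⟩ := List.append_of_mem hm
      exact ⟨p, s, by simp⟩
  unfold gSeg
  by_cases hm : '=' ∈ part
  · rw [if_pos (hin.mpr hm), if_pos hm]
    congr 1
    have : PySem.Chars.splitOnMax part ['='] 1 =
        (part.takeWhile (· ≠ '=')) :: (if '=' ∈ part then [(part.dropWhile (· ≠ '=')).tail] else []) := by
      rw [PySem.Chars.splitOnMax]
      rw [if_neg (by omega)]
      rw [show ((1 : Int)).toNat = 1 from rfl]
      simpa using splitOnMax_go_one (part.length + 1) part [] [] (by omega)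
    rw [this]
    simp
  · rw [if_neg (by simpa [hin] using hm), if_neg hm]

-- gSeg skips empty segments
theorem gSeg_nil (ks : PySem.Set String) : gSeg ks [] = ks := by simp [gSeg]

theorem mySplit_append_comma (s : List Char) :
    mySplit (s ++ [',']) = mySplit s ++ [[]] := by
  induction s with
  | nil => simp [mySplit]
  | cons c t ih =>
    by_cases hc : c = ','
    · subst hc; simp [mySplit, ih]
    · simp only [List.cons_append, mySplit, if_neg hc, ih]
      have hne := mySplit_ne_nil t
      cases hms : mySplit t with
      | nil => exact absurd hms hne
      | cons mh mt => simp [consHd, hms]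

theorem foldl_gSeg_replicate (k : Nat) :
    ∀ (s : List Char) (a : PySem.Set String),
      (mySplit (s ++ List.replicate k ',')).foldl gSeg a = (mySplit s).foldl gSeg a := by
  induction k with
  | zero => intro s a; simp
  | succ k ih =>
    intro s a
    have : s ++ List.replicate (k + 1) ',' = (s ++ [',']) ++ List.replicate k ',' := by
      simp [List.replicate_succ]
    rw [this, ih (s ++ [','])]
    rw [mySplit_append_comma]
    simp [List.foldl_append, gSeg_nil]

-- altStep evaluated on each kind of character
theorem altStep_comma (ks : PySem.Set String) (cur : List Char) (seen : Bool) :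
    altStep (ks, cur, seen) ',' = (ks, [], false) := by simp [altStep]

theorem altStep_eq_false (ks : PySem.Set String) (cur : List Char) :
    altStep (ks, cur, false) '=' = (PySem.Set.add ks (String.mk cur), cur, true) := by
  simp [altStep]

theorem altStep_eq_true (ks : PySem.Set String) (cur : List Char) :
    altStep (ks, cur, true) '=' = (ks, cur, true) := by simp [altStep]

theorem altStep_other_false (ks : PySem.Set String) (cur : List Char) (c : Char)
    (hc : ¬ c = ',') (he : ¬ c = '=') :
    altStep (ks, cur, false) c = (ks, cur ++ [c], false) := by simp [altStep, hc, he]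

theorem altStep_other_true (ks : PySem.Set String) (cur : List Char) (c : Char)
    (hc : ¬ c = ',') (he : ¬ c = '=') :
    altStep (ks, cur, true) c = (ks, cur, true) := by simp [altStep, hc, he]

-- B's scan vs the segment fold, with in-flight state (cur, seen)
theorem scan_eq (cs : List Char) :
    ∀ (ks : PySem.Set String) (cur : List Char) (seen : Bool),
      (cs.foldl altStep (ks, cur, seen)).1 =
        ((mySplit cs).tail).foldl gSeg (hAux ks cur seen ((mySplit cs).headD [])) := by
  induction cs with
  | nil => intro ks cur seen; simp [mySplit, hAux]
  | cons c t ih =>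
    intro ks cur seen
    have hne := mySplit_ne_nil t
    obtain ⟨mh, mt, hmt⟩ : ∃ mh mt, mySplit t = mh :: mt := by
      cases h : mySplit t with
      | nil => exact absurd h hne
      | cons a b => exact ⟨a, b, rfl⟩
    by_cases hc : c = ','
    · subst hc
      rw [List.foldl_cons, altStep_comma, ih ks [] false]
      have hms : mySplit (',' :: t) = [] :: mySplit t := by simp [mySplit]
      rw [hms, hmt]
      simp only [List.tail_cons, List.headD_cons, List.foldl_cons]
      congr 1
      simp [hAux, gSeg]
    · by_cases he : c = '='
      · subst he
        have hms : mySplit ('=' :: t) = consHd ['='] (mySplit t) := by simp [mySplit]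
        cases seen with
        | false =>
          rw [List.foldl_cons, altStep_eq_false, ih _ cur true]
          rw [hms, hmt]
          simp only [consHd, List.singleton_append, List.tail_cons, List.headD_cons]
          congr 1 <;> simp [hAux, List.takeWhile]
        | true =>
          rw [List.foldl_cons, altStep_eq_true, ih ks cur true]
          rw [hms, hmt]
          simp only [consHd, List.singleton_append, List.tail_cons, List.headD_cons]
          congr 1
      · have hms : mySplit (c :: t) = consHd [c] (mySplit t) := by simp [mySplit, hc]
        have hc' : ¬ ('=' = c) := fun h => he h.symm
        cases seen with
        | false =>
          rw [List.foldl_cons, altStep_other_false ks cur c hc he, ih ks (cur ++ [c]) false]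
          rw [hms, hmt]
          simp only [consHd, List.singleton_append, List.tail_cons, List.headD_cons]
          congr 1
          simp only [hAux, Bool.false_eq_true, if_neg (by simp : ¬ (False : Prop))]
          by_cases hm : '=' ∈ mh
          · rw [if_pos hm, if_pos (show '=' ∈ c :: mh from List.mem_cons_of_mem _ hm)]
            congr 2
            simp [List.takeWhile, he, hc']
          · rw [if_neg hm, if_neg (show '=' ∉ c :: mh from by simp [hm, hc'])]
        | true =>
          rw [List.foldl_cons, altStep_other_true ks cur c hc he, ih ks cur true]
          rw [hms, hmt]
          simp only [consHd, List.singleton_append, List.tail_cons, List.headD_cons]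
          congr 1

-- rstrip(",") decomposition: cs = stripped ++ replicate k ','
theorem rstrip_decomp (cs : List Char) :
    cs = (cs.reverse.dropWhile (fun c => [','].contains c)).reverse ++
         List.replicate (cs.reverse.takeWhile (fun c => [','].contains c)).length ',' := by
  conv_lhs => rw [← cs.reverse_reverse, ← List.takeWhile_append_dropWhile
    (p := fun c => [','].contains c) (l := cs.reverse)]
  rw [List.reverse_append]
  congr 1
  have hall : ∀ x ∈ cs.reverse.takeWhile (fun c => [','].contains c), x = ',' := by
    intro x hx
    have := List.mem_takeWhile_imp hx
    simpa using this
  have h2 : cs.reverse.takeWhile (fun c => [','].contains c) =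
      List.replicate (cs.reverse.takeWhile (fun c => [','].contains c)).length ',' :=
    List.eq_replicate_of_mem hall
  conv_lhs => rw [h2]
  simp [List.reverse_replicate]

-- ===== VERDICT (by name: the statement is the Claim_ definition above) =====
theorem get_selected_keys_py_spec : Claim_equal_get_selected_keys_py := by
  intro prefix_ _
  unfold Spec_get_selected_keys_py
  unfold get_selected_keys_py get_selected_keys_py_alt
  cases hcs : prefix_.toList with
  | nil => simp
  | cons c0 t0 =>
    simp only [List.isEmpty_cons, Bool.false_eq_true, if_neg (by simp : ¬ (False : Prop))]
    set cs := c0 :: t0 with hcsdef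
    -- A's side: rewrite the fold body to gSeg, splitOn to mySplit, drop the rstrip
    have hbody : ∀ (acc : PySem.Set String) (l : List (List Char)),
        l.foldl (fun ks part =>
          if PySem.Chars.isIn ['='] part then
            PySem.Set.add ks (String.mk ((PySem.Chars.splitOnMax part ['='] 1).headD []))
          else ks) acc = l.foldl gSeg acc := by
      intro acc l
      congr 1
      funext ks part
      exact partBody_eq ks part
    rw [hbody, splitOn_comma_eq]
    have hdec := rstrip_decomp cs
    have hA : (mySplit ((cs.reverse.dropWhile (fun c => [','].contains c)).reverse)).foldl gSeg
        PySem.Set.empty = (mySplit cs).foldl gSeg PySem.Set.empty := by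
      conv_rhs => rw [hdec]
      rw [foldl_gSeg_replicate]
    rw [hA]
    -- B's side
    rw [scan_eq cs PySem.Set.empty [] false]
    have hne := mySplit_ne_nil cs
    cases hms : mySplit cs with
    | nil => exact absurd hms hne
    | cons mh mt =>
      simp only [List.tail_cons, List.headD_cons, List.foldl_cons]
      congr 1
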